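-- pv_equiv track=rewrite | github.com/juliette39/tipe_password | X-Autre idées/MyHashFunct/MyHash.py | normalisation
-- ===== SOURCE A (Python) =====
-- def normalisation(mot):
--     """Utile pour SHA1 et SHA256
--     Normalise mot :
--     - Le converti en bits
--     - Lui ajoute 1
--     - Ajoute le nombre minimal de 0 pour atteindre un multiple de 512-64
--     - Ajoute la longueur de self d'origine représenté sur 64 bits"""
--
--     # Conversion en bits
--     x = ""
--     for n in range(len(mot)):
--         x += format(ord(mot[n]),'08b')
--     lon = len(x)
--     # Ajout 1
--     x += "1"
--     # Ajout nb 0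
--     while len(x) % 512 != 448:
--         x += "0"
--     # Ajout longueur
--     x += format(lon,'064b')
--     return x
-- ===== SOURCE B (Python) =====
-- def normalisation(mot):
--     x = "".join(format(ord(c), '08b') for c in mot)
--     lon = len(x)
--     zeros = (448 - (lon + 1)) % 512
--     return x + "1" + "0" * zeros + format(lon, '064b')
-- ===== Notes on version B (the rewrite author's own statement) =====
-- stated objective: simpler
-- what changed: The one-bit-at-a-time while-loop padding is replaced by a closed-form zero count (448 - (lon+1)) % 512 appended in one shot, and the indexed conversion loop by a join over the characters.
import Mathlib
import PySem

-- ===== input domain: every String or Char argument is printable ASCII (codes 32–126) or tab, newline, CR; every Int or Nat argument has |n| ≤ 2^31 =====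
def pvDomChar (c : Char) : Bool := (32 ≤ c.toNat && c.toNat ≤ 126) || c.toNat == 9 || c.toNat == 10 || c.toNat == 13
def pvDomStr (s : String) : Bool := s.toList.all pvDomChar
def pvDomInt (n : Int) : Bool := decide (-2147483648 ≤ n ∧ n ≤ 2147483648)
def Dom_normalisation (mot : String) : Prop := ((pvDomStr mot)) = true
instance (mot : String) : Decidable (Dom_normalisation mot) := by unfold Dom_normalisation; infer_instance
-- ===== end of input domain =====

-- B replaces A's one-bit-at-a-time padding while-loop by a closed-form count of zeros
-- ((448 - (lon+1)) % 512) appended in one shot (objective: simpler).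

-- shared helper: format(n,'0<w>b') — binary digits of n, MSB first, left-padded with '0' to width w
def bitsOf (n : Nat) : List Char :=
  if n = 0 then [] else bitsOf (n / 2) ++ [if n % 2 = 1 then '1' else '0']
decreasing_by exact Nat.div_lt_self (Nat.pos_of_ne_zero (by assumption)) (by omega)

def fmtBin (n w : Nat) : List Char :=
  let b := if n = 0 then ['0'] else bitsOf n
  List.replicate (w - b.length) '0' ++ b

-- ===== PORT A =====
-- the while-loop, made total with a fuel bound (512 always suffices: the zero count is < 512)
def padLoop : Nat → List Char → List Char
  | 0, x => x
  | fuel+1, x => if x.length % 512 ≠ 448 then padLoop fuel (x ++ ['0']) else x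

def normalisation (mot : String) : String :=
  let l := mot.toList
  let x := (List.range l.length).foldl (fun acc n => acc ++ fmtBin (l.getD n ' ').toNat 8) []
  let lon := x.length
  let x := x ++ ['1']
  let x := padLoop 512 x
  String.ofList (x ++ fmtBin lon 64)

-- ===== PORT B =====
def normalisation_alt (mot : String) : String :=
  let x := (mot.toList.map (fun c => fmtBin c.toNat 8)).flatten
  let lon := x.length
  let zeros := PySem.Int.mod (448 - ((lon : Int) + 1)) 512
  String.ofList (x ++ ['1'] ++ List.replicate zeros.toNat '0' ++ fmtBin lon 64)

-- ===== PRECONDITION & SPEC =====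
def Spec_normalisation (mot : String) (out : String) : Prop := out = normalisation_alt mot
instance (mot : String) (out : String) : Decidable (Spec_normalisation mot out) := by unfold Spec_normalisation; infer_instance

-- ===== CLAIM (what is proved, stated in full; the proofs are below) =====
def Claim_equal_normalisation : Prop := ∀ (mot : String), Dom_normalisation mot → Spec_normalisation mot (normalisation mot)

-- ===== LEMMAS AND PROOFS =====

-- A's indexed conversion loop produces the flattened map of B
theorem conv_eq (f : Char → List Char) (l : List Char) (init : List Char) :
    (List.range l.length).foldl (fun acc n => acc ++ f (l.getD n ' ')) init
      = init ++ (l.map f).flatten := by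
  induction l using List.reverseRecOn generalizing init with
  | nil => simp
  | append_singleton l a ih =>
    rw [List.length_append, List.length_singleton, List.range_succ, List.foldl_append]
    have h1 : (List.range l.length).foldl (fun acc n => acc ++ f ((l ++ [a]).getD n ' ')) init
        = (List.range l.length).foldl (fun acc n => acc ++ f (l.getD n ' ')) init :=
      PySem.List.foldl_congr_mem _ _ _ _ (fun acc n hn => by
        have hlt : n < l.length := List.mem_range.mp hn
        simp [List.getD, List.getElem?_append_left hlt])
    rw [h1, ih]
    simp [List.getD]

-- zero count of the while-loop, in Nat form
theorem padLoop_eq : ∀ (fuel : Nat) (y : List Char),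
    (960 - y.length % 512) % 512 ≤ fuel →
    padLoop fuel y = y ++ List.replicate ((960 - y.length % 512) % 512) '0' := by
  intro fuel
  induction fuel with
  | zero =>
    intro y h
    have hz : (960 - y.length % 512) % 512 = 0 := by omega
    simp [padLoop, hz]
  | succ n ih =>
    intro y h
    by_cases hc : y.length % 512 = 448
    · have hz : (960 - y.length % 512) % 512 = 0 := by omega
      simp [padLoop, hc]
    · have hstep : (960 - (y.length + 1) % 512) % 512 + 1 = (960 - y.length % 512) % 512 := by
        omega
      have h' : (960 - (y ++ ['0']).length % 512) % 512 ≤ n := by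
        simp only [List.length_append, List.length_singleton]
        omega
      rw [padLoop, if_pos hc, ih _ h']
      have : (960 - y.length % 512) % 512 = ((960 - (y.length + 1) % 512) % 512) + 1 := by omega
      rw [this, List.replicate_succ]
      simp [List.length_append]

theorem zeros_cast (L : Nat) :
    (PySem.Int.mod (448 - ((L : Int) + 1)) 512).toNat = (960 - (L + 1) % 512) % 512 := by
  rw [PySem.Int.mod_eq_emod_of_pos (by norm_num)]
  omega

-- ===== VERDICT (by name: the statement is the Claim_ definition above) =====
theorem normalisation_spec : Claim_equal_normalisation := by
  intro mot _
  unfold Spec_normalisation normalisation normalisation_alt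
  dsimp only
  rw [conv_eq (fun c => fmtBin c.toNat 8) mot.toList []]
  simp only [List.nil_append]
  set x := (mot.toList.map (fun c => fmtBin c.toNat 8)).flatten with hx
  have hfuel : (960 - (x ++ ['1']).length % 512) % 512 ≤ 512 := by omega
  rw [padLoop_eq 512 (x ++ ['1']) hfuel, zeros_cast]
  simp [List.length_append]
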